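-- pv_equiv track=rewrite | github.com/KuphJr/SecureSecretSplitter | encoder.py | convertWordListToBase10
-- ===== SOURCE A (Python) =====
-- def convertWordListToBase10(wordList):
--     # Convert from base-95 (valid ASCII characters) to base-10 (traditional numbers)
--     # Valid ASCII characters are from ' ' to '~'
--     # See ASCII table here: https://www.rapidtables.com/code/text/ascii-table.html
--     base10 = [0] * len(wordList)
--     i = 0
--     for word in wordList:
--         base10word = 0
--         exp = len(word) - 1
--         for character in word:
--             base10word += (ord(character) - ord(" ")) * 95 ** exp
--             exp -= 1
--         base10[i] = base10word
--         i += 1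
--     return base10
-- ===== SOURCE B (Python) =====
-- def convertWordListToBase10(wordList):
--     # Horner's rule: one multiply-add per character, no bignum powers.
--     def horner(word):
--         n = 0
--         for ch in word:
--             n = n * 95 + (ord(ch) - 32)
--         return n
--     return [horner(word) for word in wordList]
-- ===== Notes on version B (the rewrite author's own statement) =====
-- stated objective: alternative
-- what changed: Replaces the preallocated output array and per-character 95**exp bignum power with a list comprehension computing each word by Horner's rule (n = n*95 + digit); intended as faster, measured ~1.5x at the largest size but not consistently confirmed.
import Mathlib
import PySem

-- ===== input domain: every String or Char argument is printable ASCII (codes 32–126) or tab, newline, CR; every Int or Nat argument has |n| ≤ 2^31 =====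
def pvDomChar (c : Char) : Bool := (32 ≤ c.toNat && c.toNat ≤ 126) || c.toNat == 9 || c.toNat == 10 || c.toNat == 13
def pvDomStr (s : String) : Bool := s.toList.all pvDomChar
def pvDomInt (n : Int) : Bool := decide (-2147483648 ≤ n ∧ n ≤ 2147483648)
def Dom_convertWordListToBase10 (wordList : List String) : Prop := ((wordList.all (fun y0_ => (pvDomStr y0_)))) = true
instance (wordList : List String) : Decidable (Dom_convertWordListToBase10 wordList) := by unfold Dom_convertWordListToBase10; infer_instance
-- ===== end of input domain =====

-- B replaces A's preallocated array + per-character 95**exp powers with a map computing each word by Horner's rule (alternative algorithm; intended as faster, measured ~1.5x at the largest size but not consistently confirmed).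
-- ===== PORT A =====
-- inner loop of A: accumulate (ord c - 32) * 95 ** exp, exp counts down from len-1
def pvAWord (w : List Char) : Int :=
  (w.foldl (fun (p : Int × Int) c =>
      (p.1 + ((c.toNat : Int) - 32) * 95 ^ p.2.toNat, p.2 - 1))
    ((0 : Int), (w.length : Int) - 1)).1

def convertWordListToBase10 (wordList : List String) : List Int :=
  -- base10 = [0] * len(wordList); i = 0; for word: base10[i] = base10word; i += 1
  (wordList.foldl (fun (st : List Int × Nat) word =>
      (st.1.set st.2 (pvAWord word.toList), st.2 + 1))
    (List.replicate wordList.length (0 : Int), 0)).1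

-- ===== PORT B =====
def pvHorner (w : List Char) : Int :=
  w.foldl (fun n c => n * 95 + ((c.toNat : Int) - 32)) 0

def convertWordListToBase10_alt (wordList : List String) : List Int :=
  wordList.map (fun word => pvHorner word.toList)

-- ===== PRECONDITION & SPEC =====
def Spec_convertWordListToBase10 (wordList : List String) (out : List Int) : Prop := out = convertWordListToBase10_alt wordList
instance (wordList : List String) (out : List Int) : Decidable (Spec_convertWordListToBase10 wordList out) := by unfold Spec_convertWordListToBase10; infer_instance

-- ===== CLAIM (what is proved, stated in full; the proofs are below) =====
def Claim_equal_convertWordListToBase10 : Prop := ∀ (wordList : List String), Dom_convertWordListToBase10 wordList → Spec_convertWordListToBase10 wordList (convertWordListToBase10 wordList)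

-- ===== LEMMAS AND PROOFS =====

-- ===== VERDICT (by name: the statement is the Claim_ definition above) =====
-- Horner with seed b equals b * 95^len plus Horner from 0
lemma pvHorner_gen (w : List Char) : ∀ b : Int,
    w.foldl (fun n c => n * 95 + ((c.toNat : Int) - 32)) b
      = b * 95 ^ w.length + pvHorner w := by
  induction w with
  | nil => intro b; simp [pvHorner]
  | cons c w ih =>
      intro b
      simp only [List.foldl_cons, pvHorner, List.length_cons]
      rw [ih, ih ((0:Int) * 95 + ((c.toNat : Int) - 32))]
      ring

-- A's power-sum inner loop equals Horner
lemma pvAWord_eq (w : List Char) : ∀ a : Int,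
    (w.foldl (fun (p : Int × Int) c =>
        (p.1 + ((c.toNat : Int) - 32) * 95 ^ p.2.toNat, p.2 - 1))
      (a, (w.length : Int) - 1)).1 = a + pvHorner w := by
  induction w with
  | nil => intro a; simp [pvHorner]
  | cons c w ih =>
      intro a
      have hcast : ((w.length : Int) + 1 - 1).toNat = w.length := by omega
      simp only [List.foldl_cons, List.length_cons]
      push_cast
      rw [show ((w.length : Int) + 1 - 1 - 1) = (w.length : Int) - 1 by ring]
      rw [ih]
      rw [show pvHorner (c :: w)
            = ((0:Int) * 95 + ((c.toNat : Int) - 32)) * 95 ^ w.length + pvHorner w by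
        simpa [pvHorner] using pvHorner_gen w ((0:Int) * 95 + ((c.toNat : Int) - 32))]
      rw [hcast]
      ring

-- A's set-into-preallocated-array loop produces the map, given a prefix already filled
lemma pvFold_set (ws : List String) : ∀ acc : List Int,
    (ws.foldl (fun (st : List Int × Nat) word =>
        (st.1.set st.2 (pvAWord word.toList), st.2 + 1))
      (acc ++ List.replicate ws.length (0 : Int), acc.length)).1
      = acc ++ ws.map (fun word => pvHorner word.toList) := by
  induction ws with
  | nil => intro acc; simp
  | cons w ws ih =>
      intro acc
      have hA : pvAWord w.toList = pvHorner w.toList := by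
        simpa using pvAWord_eq w.toList 0
      have hset : (acc ++ List.replicate (ws.length + 1) (0 : Int)).set acc.length
            (pvHorner w.toList)
          = (acc ++ [pvHorner w.toList]) ++ List.replicate ws.length (0 : Int) := by
        rw [List.set_append_right acc.length (pvHorner w.toList) (le_refl _), List.replicate_succ]
        simp
      simp only [List.foldl_cons, List.length_cons, hA, hset]
      have := ih (acc ++ [pvHorner w.toList])
      simp only [List.length_append, List.length_cons, List.length_nil] at this
      rw [this]
      simp

theorem convertWordListToBase10_spec : Claim_equal_convertWordListToBase10 := by
  intro wordList _
  unfold Spec_convertWordListToBase10 convertWordListToBase10 convertWordListToBase10_alt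
  simpa using pvFold_set wordList []
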